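-- pv_equiv track=rewrite | github.com/bespoke-silicon-group/reallm | simulator/kernel/kernel_size_gen.py | gen_parallelism
-- ===== SOURCE A (Python) =====
-- def gen_parallelism(num_nodes: int):
--     all_parallelism = [] # List of tuples (tensor_parallelism, pipeline_parallelism, context_parallelism)
--     # generate tensor, pipeline and context parallelism
--     for tensor_parallelism in range(1, num_nodes+1):
--         for pipeline_parallelism in range(1, num_nodes+1):
--             for context_parallelism in range(1, num_nodes+1):
--                 if tensor_parallelism * pipeline_parallelism * context_parallelism == num_nodes:
--                     all_parallelism.append((1, tensor_parallelism, pipeline_parallelism, context_parallelism))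
--     return all_parallelism
-- ===== SOURCE B (Python) =====
-- def gen_parallelism(num_nodes: int):
--     # Enumerate divisors once; the cubic scan over all (tp, pp, cp) disappears.
--     divs = [d for d in range(1, num_nodes + 1) if num_nodes % d == 0]
--     all_parallelism = []
--     for tensor_parallelism in divs:
--         rest = num_nodes // tensor_parallelism
--         for pipeline_parallelism in divs:
--             if rest % pipeline_parallelism == 0:
--                 all_parallelism.append((1, tensor_parallelism,
--                                         pipeline_parallelism,
--                                         rest // pipeline_parallelism))
--     return all_parallelism
-- ===== Notes on version B (the rewrite author's own statement) =====
-- stated objective: faster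
-- what changed: Replaces the triple nested scan over all of range(1,n+1)^3 with a single divisor-list pass: tp and pp range over the divisors of n and the third factor is computed as (n//tp)//pp instead of searched for.
import Mathlib
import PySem

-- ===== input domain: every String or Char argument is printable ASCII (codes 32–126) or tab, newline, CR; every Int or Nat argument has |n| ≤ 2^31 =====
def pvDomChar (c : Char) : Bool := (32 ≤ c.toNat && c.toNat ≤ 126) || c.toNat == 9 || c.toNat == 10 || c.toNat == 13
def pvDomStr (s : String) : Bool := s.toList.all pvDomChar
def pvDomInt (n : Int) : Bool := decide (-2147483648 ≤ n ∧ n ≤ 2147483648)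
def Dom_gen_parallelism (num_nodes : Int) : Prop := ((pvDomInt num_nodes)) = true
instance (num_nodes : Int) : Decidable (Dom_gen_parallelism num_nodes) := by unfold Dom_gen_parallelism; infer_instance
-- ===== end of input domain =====

-- ===== PORT A =====
-- A: triple nested scan over range(1, n+1), keeping triples whose product is n.
def gen_parallelism (num_nodes : Int) : List (Int × Int × Int × Int) :=
  (PySem.List.pyRange 1 (num_nodes + 1) 1).foldl (fun acc tp =>
    (PySem.List.pyRange 1 (num_nodes + 1) 1).foldl (fun acc pp =>
      (PySem.List.pyRange 1 (num_nodes + 1) 1).foldl (fun acc cp =>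
        if tp * pp * cp == num_nodes then acc ++ [(1, tp, pp, cp)] else acc) acc) acc) []

-- ===== PORT B =====
-- B: enumerate divisors once; for each divisor pair (tp, pp) with pp ∣ n//tp the third
-- factor is forced, so the cubic scan disappears.
def gen_parallelism_alt (num_nodes : Int) : List (Int × Int × Int × Int) :=
  let divs := (PySem.List.pyRange 1 (num_nodes + 1) 1).filter
    (fun d => PySem.Int.mod num_nodes d == 0)
  divs.foldl (fun acc tp =>
    let rest := PySem.Int.floordiv num_nodes tp
    divs.foldl (fun acc pp =>
      if PySem.Int.mod rest pp == 0 then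
        acc ++ [(1, tp, pp, PySem.Int.floordiv rest pp)]
      else acc) acc) []

-- ===== PRECONDITION & SPEC =====
def Spec_gen_parallelism (num_nodes : Int) (out : List (Int × Int × Int × Int)) : Prop := out = gen_parallelism_alt num_nodes
instance (num_nodes : Int) (out : List (Int × Int × Int × Int)) : Decidable (Spec_gen_parallelism num_nodes out) := by unfold Spec_gen_parallelism; infer_instance

-- ===== CLAIM (what is proved, stated in full; the proofs are below) =====
def Claim_equal_gen_parallelism : Prop := ∀ (num_nodes : Int), Dom_gen_parallelism num_nodes → Spec_gen_parallelism num_nodes (gen_parallelism num_nodes)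

-- ===== LEMMAS AND PROOFS =====

-- Dropping the elements on which g is empty does not change a flatMap.
theorem pv_flatMap_filter {α β : Type} (l : List α) (p : α → Bool) (g : α → List β)
    (h : ∀ x ∈ l, p x = false → g x = []) :
    l.flatMap g = (l.filter p).flatMap g := by
  induction l with
  | nil => rfl
  | cons a t ih =>
    have ih' := ih (fun x hx => h x (List.mem_cons_of_mem a hx))
    by_cases hp : p a
    · simp [hp, List.flatMap_cons, ih']
    · simp only [Bool.not_eq_true] at hp
      simp [hp, List.flatMap_cons, h a (List.mem_cons_self) hp, ih']

-- The innermost loop of A finds exactly the forced third factor (or nothing).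
theorem pv_inner_filter (n m : Int) (hm : 1 ≤ m) (hn : 1 ≤ n) :
    (PySem.List.pyRange 1 (n + 1) 1).filter (fun cp => m * cp == n) =
      if m ∣ n then [n / m] else [] := by
  by_cases hd : m ∣ n
  · have hq1 : 1 ≤ n / m := by
      rcases hd with ⟨k, hk⟩
      have hk1 : 1 ≤ k := by nlinarith
      have : n / m = k := by rw [hk]; exact Int.mul_ediv_cancel_left k (by omega)
      omega
    have hqn : n / m ≤ n := by
      exact Int.ediv_le_self _ (by omega)
    have hmem : n / m ∈ PySem.List.pyRange 1 (n + 1) 1 := by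
      rw [PySem.List.mem_pyRange_one]; omega
    have hcong : (PySem.List.pyRange 1 (n + 1) 1).filter (fun cp => m * cp == n) =
        (PySem.List.pyRange 1 (n + 1) 1).filter (fun cp => cp == n / m) := by
      apply List.filter_congr
      intro cp _
      have : m * cp = n ↔ cp = n / m := by
        constructor
        · intro h; rw [← h]; exact (Int.mul_ediv_cancel_left cp (by omega)).symm
        · intro h; rw [h]; exact Int.mul_ediv_cancel' hd
      simp [this]
    rw [hcong, List.filter_beq,
      List.count_eq_one_of_mem (PySem.List.nodup_pyRange_one 1 (n+1)) hmem]
    simp [hd]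
  · rw [List.filter_eq_nil_iff.mpr, if_neg hd]
    intro cp _
    simp only [beq_iff_eq]
    intro h
    exact hd ⟨cp, h.symm⟩

-- The flatMap/filter normal form of port A.
theorem pv_A_eq (n : Int) :
    gen_parallelism n =
      (PySem.List.pyRange 1 (n + 1) 1).flatMap (fun tp =>
        (PySem.List.pyRange 1 (n + 1) 1).flatMap (fun pp =>
          ((PySem.List.pyRange 1 (n + 1) 1).filter (fun cp => tp * pp * cp == n)).map
            (fun cp => ((1 : Int), tp, pp, cp)))) := by
  unfold gen_parallelism
  rw [PySem.List.foldl_congr_mem' (g := fun acc tp => acc ++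
      (PySem.List.pyRange 1 (n + 1) 1).flatMap (fun pp =>
        ((PySem.List.pyRange 1 (n + 1) 1).filter (fun cp => tp * pp * cp == n)).map
          (fun cp => ((1 : Int), tp, pp, cp))))]
  · rw [PySem.List.foldl_append_eq_flatMap]; simp
  · intro tp _ acc
    rw [PySem.List.foldl_congr_mem' (g := fun acc pp => acc ++
        ((PySem.List.pyRange 1 (n + 1) 1).filter (fun cp => tp * pp * cp == n)).map
          (fun cp => ((1 : Int), tp, pp, cp)))]
    · rw [PySem.List.foldl_append_eq_flatMap]
    · intro pp _ acc
      rw [PySem.List.foldl_append_if]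

-- The flatMap/filter normal form of port B.
theorem pv_B_eq (n : Int) :
    gen_parallelism_alt n =
      ((PySem.List.pyRange 1 (n + 1) 1).filter (fun d => PySem.Int.mod n d == 0)).flatMap
        (fun tp =>
          (((PySem.List.pyRange 1 (n + 1) 1).filter (fun d => PySem.Int.mod n d == 0)).filter
              (fun pp => PySem.Int.mod (PySem.Int.floordiv n tp) pp == 0)).map
            (fun pp => ((1 : Int), tp, pp,
              PySem.Int.floordiv (PySem.Int.floordiv n tp) pp))) := by
  unfold gen_parallelism_alt
  simp only []
  rw [PySem.List.foldl_congr_mem' (g := fun acc tp => acc ++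
      (((PySem.List.pyRange 1 (n + 1) 1).filter (fun d => PySem.Int.mod n d == 0)).filter
          (fun pp => PySem.Int.mod (PySem.Int.floordiv n tp) pp == 0)).map
        (fun pp => ((1 : Int), tp, pp,
          PySem.Int.floordiv (PySem.Int.floordiv n tp) pp)))]
  · rw [PySem.List.foldl_append_eq_flatMap]; simp
  · intro tp _ acc
    rw [PySem.List.foldl_append_if]

-- For a fixed divisor tp, A's two inner loops equal B's single filtered pass.
theorem pv_inner_eq (n tp : Int) (hn : 1 ≤ n) (htp1 : 1 ≤ tp) (htp : tp ∣ n) :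
    (PySem.List.pyRange 1 (n + 1) 1).flatMap (fun pp =>
        ((PySem.List.pyRange 1 (n + 1) 1).filter (fun cp => tp * pp * cp == n)).map
          (fun cp => ((1 : Int), tp, pp, cp))) =
      (((PySem.List.pyRange 1 (n + 1) 1).filter (fun d => PySem.Int.mod n d == 0)).filter
          (fun pp => PySem.Int.mod (PySem.Int.floordiv n tp) pp == 0)).map
        (fun pp => ((1 : Int), tp, pp,
          PySem.Int.floordiv (PySem.Int.floordiv n tp) pp)) := by
  have htp0 : (0 : Int) < tp := by omega
  have hfd : PySem.Int.floordiv n tp = n / tp := PySem.Int.floordiv_eq_ediv_of_pos htp0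
  -- collapse the double filter on the B side to a single condition
  have hBfilter :
      ((PySem.List.pyRange 1 (n + 1) 1).filter (fun d => PySem.Int.mod n d == 0)).filter
          (fun pp => PySem.Int.mod (PySem.Int.floordiv n tp) pp == 0) =
        (PySem.List.pyRange 1 (n + 1) 1).filter (fun pp => tp * pp ∣ n) := by
    rw [List.filter_filter]
    apply List.filter_congr
    intro pp hpp
    rw [PySem.List.mem_pyRange_one] at hpp
    have hpp0 : (0 : Int) < pp := by omega
    rw [hfd]
    rw [Bool.eq_iff_iff]
    simp only [Bool.and_eq_true, beq_iff_eq,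
      PySem.Int.mod_eq_zero_iff_dvd, decide_eq_true_eq]
    constructor
    · intro h
      obtain ⟨k, hk⟩ := h.1
      exact ⟨k, by rw [← Int.ediv_mul_cancel htp, hk]; ring⟩
    · intro ⟨k, hk⟩
      refine ⟨⟨k, ?_⟩, ⟨tp * k, by rw [hk]; ring⟩⟩
      rw [hk, show tp * pp * k = tp * (pp * k) by ring,
        Int.mul_ediv_cancel_left _ (by omega)]
  rw [hBfilter]
  -- on the A side, pp's with tp * pp ∤ n contribute nothing
  rw [pv_flatMap_filter _ (fun pp => decide (tp * pp ∣ n))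
    (h := by
      intro pp hpp hnd
      rw [PySem.List.mem_pyRange_one] at hpp
      rw [pv_inner_filter n (tp * pp) (by nlinarith) hn]
      simp only [decide_eq_false_iff_not] at hnd
      simp [hnd])]
  -- on the surviving pp's, both sides produce the same singleton
  rw [List.flatMap_congr (g := fun pp =>
      [((1 : Int), tp, pp, PySem.Int.floordiv (PySem.Int.floordiv n tp) pp)])]
  · exact (List.map_eq_flatMap ..).symm
  · intro pp hpp
    rw [List.mem_filter] at hpp
    obtain ⟨hpr, hpd⟩ := hpp
    rw [PySem.List.mem_pyRange_one] at hpr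
    simp only [decide_eq_true_eq] at hpd
    rw [pv_inner_filter n (tp * pp) (by nlinarith) hn, if_pos hpd]
    have : PySem.Int.floordiv (PySem.Int.floordiv n tp) pp = n / (tp * pp) := by
      rw [hfd, PySem.Int.floordiv_eq_ediv_of_pos (by omega),
        Int.ediv_ediv_of_nonneg (by omega)]
    simp [this]

-- ===== VERDICT (by name: the statement is the Claim_ definition above) =====
theorem gen_parallelism_spec : Claim_equal_gen_parallelism := by
  intro n _
  unfold Spec_gen_parallelism
  rw [pv_A_eq, pv_B_eq]
  by_cases hn : 1 ≤ n
  · rw [pv_flatMap_filter _ (fun d => PySem.Int.mod n d == 0)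
      (h := by
        intro tp htp hnd
        rw [PySem.List.mem_pyRange_one] at htp
        simp only [beq_eq_false_iff_ne, ne_eq,
          PySem.Int.mod_eq_zero_iff_dvd] at hnd
        rw [List.flatMap_eq_nil_iff]
        intro pp _
        rw [List.filter_eq_nil_iff.mpr]
        · rfl
        · intro cp _
          simp only [beq_iff_eq]
          intro h
          exact hnd ⟨pp * cp, by rw [← h]; ring⟩)]
    apply List.flatMap_congr
    intro tp htp
    rw [List.mem_filter] at htp
    obtain ⟨htr, htd⟩ := htp
    rw [PySem.List.mem_pyRange_one] at htr
    simp only [beq_iff_eq, PySem.Int.mod_eq_zero_iff_dvd] at htd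
    exact pv_inner_eq n tp hn (by omega) htd
  · rw [PySem.List.pyRange_one_eq_nil (by omega)]
    simp
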